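-- pv_equiv track=rewrite | github.com/Animadversio/py2048 | main.py | mergeSeq
-- ===== SOURCE A (Python) =====
-- def mergeSeq(seq):
--     # merge from left
--     # this is not exhaustive merge. can change to merge everything.
--     csr = 0
--     reward = 0
--     while csr + 1 <= len(seq) - 1:
--         if seq[csr] == seq[csr+1]:
--             seq[csr+1] = seq[csr] * 2
--             reward += seq[csr+1]
--             seq.pop(csr)
--             # csr += 1 # comment this out give an additional merge to
--         else:
--             csr += 1
--     return seq, reward
-- ===== SOURCE B (Python) =====
-- def mergeSeq(seq):
--     # single left-to-right pass: merge each element into the last of the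
--     # result when equal (merged tile may merge again, as in A's cascade)
--     res = []
--     reward = 0
--     for x in seq:
--         if res and res[-1] == x:
--             res[-1] *= 2
--             reward += res[-1]
--         else:
--             res.append(x)
--     return res, reward
-- ===== Notes on version B (the rewrite author's own statement) =====
-- stated objective: alternative
-- what changed: Replaces the in-place while loop with cursor arithmetic and pop(csr) by a single left-to-right pass that builds a fresh result list and merges each element into its last entry, cascading merges included.
import Mathlib
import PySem

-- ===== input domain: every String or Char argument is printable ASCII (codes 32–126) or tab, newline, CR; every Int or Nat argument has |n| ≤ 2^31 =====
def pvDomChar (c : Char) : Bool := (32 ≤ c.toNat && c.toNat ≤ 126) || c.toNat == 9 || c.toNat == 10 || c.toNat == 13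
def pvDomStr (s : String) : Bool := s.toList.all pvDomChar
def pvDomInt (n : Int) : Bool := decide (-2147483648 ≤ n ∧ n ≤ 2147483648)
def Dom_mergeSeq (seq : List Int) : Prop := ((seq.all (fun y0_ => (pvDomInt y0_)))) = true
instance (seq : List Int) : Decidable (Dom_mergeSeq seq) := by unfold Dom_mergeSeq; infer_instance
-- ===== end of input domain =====

-- B replaces A's in-place while loop (cursor arithmetic and pop(csr)) by one left-to-right pass
-- building a fresh result list; equivalence is about the RETURN value only (A mutates its argument).


-- ===== PORT A =====
-- the while loop: state is the (mutated) list, the cursor and the reward;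
-- seq.pop(csr) is List.eraseIdx, seq[i] with i known in range is List.getD
def mergeSeqLoop (seq : List Int) (csr : Nat) (reward : Int) : List Int × Int :=
  if h : csr + 1 < seq.length then
    let a := seq.getD csr 0
    let b := seq.getD (csr + 1) 0
    if a = b then
      mergeSeqLoop ((seq.set (csr + 1) (a * 2)).eraseIdx csr) csr (reward + a * 2)
    else
      mergeSeqLoop seq (csr + 1) reward
  else
    (seq, reward)
termination_by seq.length - csr
decreasing_by
  · simp [List.length_eraseIdx]
    split_ifs <;> omega
  · omega

def mergeSeq (seq : List Int) : List Int × Int := mergeSeqLoop seq 0 0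

-- ===== PORT B =====
-- one fold over seq; res[-1] is getLast?, 'res[-1] *= 2' is dropLast ++ [y*2]
def mergeStep (p : List Int × Int) (x : Int) : List Int × Int :=
  match p.1.getLast? with
  | some y => if y = x then (p.1.dropLast ++ [y * 2], p.2 + y * 2) else (p.1 ++ [x], p.2)
  | none => (p.1 ++ [x], p.2)

def mergeSeq_alt (seq : List Int) : List Int × Int := seq.foldl mergeStep ([], 0)

-- ===== PRECONDITION & SPEC =====
def Spec_mergeSeq (seq : List Int) (out : List Int × Int) : Prop := out = mergeSeq_alt seq
instance (seq : List Int) (out : List Int × Int) : Decidable (Spec_mergeSeq seq out) := by unfold Spec_mergeSeq; infer_instance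

-- ===== CLAIM (what is proved, stated in full; the proofs are below) =====
def Claim_equal_mergeSeq : Prop := ∀ (seq : List Int), Dom_mergeSeq seq → Spec_mergeSeq seq (mergeSeq seq)

-- ===== LEMMAS AND PROOFS =====

-- Loop invariant: with the settled prefix `pre` and the current (possibly merged)
-- element `pending` at the cursor, A's loop computes what B's fold computes on the rest.
theorem mergeSeqLoop_eq_foldl (rest : List Int) :
    ∀ (pre : List Int) (pending : Int) (reward : Int),
      mergeSeqLoop (pre ++ pending :: rest) pre.length reward
        = rest.foldl mergeStep (pre ++ [pending], reward) := by
  induction rest with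
  | nil =>
      intro pre pending reward
      rw [mergeSeqLoop]
      simp
  | cons x rest' ih =>
      intro pre pending reward
      rw [mergeSeqLoop]
      have hlen : pre.length + 1 < (pre ++ pending :: x :: rest').length := by
        simp
      rw [dif_pos hlen]
      have hget1 : (pre ++ pending :: x :: rest').getD pre.length 0 = pending := by
        simp [List.getD]
      have hget2 : (pre ++ pending :: x :: rest').getD (pre.length + 1) 0 = x := by
        simp [List.getD]
      rw [hget1, hget2]
      by_cases hpx : pending = x
      · rw [if_pos hpx]
        have hset : (pre ++ pending :: x :: rest').set (pre.length + 1) (pending * 2)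
            = pre ++ pending :: pending * 2 :: rest' := by
          rw [show pre ++ pending :: x :: rest' = (pre ++ [pending]) ++ x :: rest' from by simp,
              List.set_append]
          simp
        have herase : (pre ++ pending :: pending * 2 :: rest').eraseIdx pre.length
            = pre ++ pending * 2 :: rest' := by
          rw [List.eraseIdx_append_of_length_le (le_refl _)]
          simp
        rw [hset, herase, ih pre (pending * 2) (reward + pending * 2)]
        simp [List.foldl_cons, mergeStep, hpx]
      · rw [if_neg hpx]
        have hre : pre ++ pending :: x :: rest' = (pre ++ [pending]) ++ x :: rest' := by simp
        have hlen' : pre.length + 1 = (pre ++ [pending]).length := by simp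
        rw [hre, hlen', ih (pre ++ [pending]) x reward]
        simp [List.foldl_cons, mergeStep, hpx]

-- ===== VERDICT (by name: the statement is the Claim_ definition above) =====
theorem mergeSeq_spec : Claim_equal_mergeSeq := by
  intro seq _
  unfold Spec_mergeSeq mergeSeq mergeSeq_alt
  cases seq with
  | nil => rw [mergeSeqLoop]; simp
  | cons x rest =>
      have := mergeSeqLoop_eq_foldl rest [] x 0
      simpa using this
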